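-- pv_equiv track=rewrite | github.com/Hephaesteus266/GOA-homeworks | day23/classwork23/classwork23.py | replace_even_indices
-- ===== SOURCE A (Python) =====
-- def replace_even_indices(input_string, replacement_char):
--     result = ""
--     for i in range(len(input_string)):
--         if i % 2 == 0:  # Check if index is even
--             result += replacement_char  # Replace with the specified character
--         else:
--             result += input_string[i]  # Keep the original character
--     return result
-- ===== SOURCE B (Python) =====
-- def replace_even_indices(input_string, replacement_char):
--     chars = list(input_string)
--     chars[::2] = [replacement_char] * ((len(input_string) + 1) // 2)
--     return ''.join(chars)
-- ===== Notes on version B (the rewrite author's own statement) =====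
-- stated objective: idiomatic
-- what changed: Replaces the index loop with a per-index parity test by a single bulk slice assignment chars[::2] = [replacement_char]*ceil(n/2) followed by one join.
import Mathlib
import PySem

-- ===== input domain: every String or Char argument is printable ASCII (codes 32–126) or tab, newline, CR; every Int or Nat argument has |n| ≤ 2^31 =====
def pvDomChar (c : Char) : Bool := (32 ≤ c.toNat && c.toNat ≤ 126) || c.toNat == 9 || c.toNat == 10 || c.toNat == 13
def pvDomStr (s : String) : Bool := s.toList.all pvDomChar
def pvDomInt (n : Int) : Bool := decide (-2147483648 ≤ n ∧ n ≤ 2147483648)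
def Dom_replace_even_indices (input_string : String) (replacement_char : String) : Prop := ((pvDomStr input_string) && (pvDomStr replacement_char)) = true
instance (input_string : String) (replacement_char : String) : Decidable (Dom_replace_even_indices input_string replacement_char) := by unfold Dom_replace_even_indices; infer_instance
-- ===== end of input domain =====

-- B replaces A's index loop with its per-index parity test by one bulk slice assignment
-- chars[::2] = [replacement_char]*ceil(n/2) plus a single join (objective: idiomatic).

-- ===== PORT A =====
-- accumulating Python string 'result' is carried as its List Char; '+=' is list append,
-- input_string[i] is pyGetD on the char list (index i ∈ range(len) is always in range)
def replace_even_indices (input_string : String) (replacement_char : String) : String :=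
  let result : List Char :=
    (PySem.List.pyRange 0 (PySem.Str.len input_string) 1).foldl
      (fun result i =>
        if PySem.Int.mod i 2 == 0 then
          result ++ replacement_char.toList
        else
          result ++ [PySem.List.pyGetD input_string.toList i ' '])
      []
  String.ofList result

-- ===== PORT B =====
-- chars[::2] = reps : walk the char list two at a time, consuming one replacement per even slot
def pvSliceAssignEven : List String → List String → List String
  | _, [] => []
  | [], c :: cs => c :: cs
  | rep :: reps, _ :: cs =>
    match cs with
    | [] => [rep]
    | d :: ds => rep :: d :: pvSliceAssignEven reps ds

def replace_even_indices_alt (input_string : String) (replacement_char : String) : String :=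
  let chars : List String := input_string.toList.map (fun c => String.ofList [c])
  let chars := pvSliceAssignEven
    (List.replicate ((input_string.toList.length + 1) / 2) replacement_char) chars
  PySem.Str.join "" chars

-- ===== PRECONDITION & SPEC =====
def Spec_replace_even_indices (input_string : String) (replacement_char : String) (out : String) : Prop := out = replace_even_indices_alt input_string replacement_char
instance (input_string : String) (replacement_char : String) (out : String) : Decidable (Spec_replace_even_indices input_string replacement_char out) := by unfold Spec_replace_even_indices; infer_instance

-- ===== CLAIM (what is proved, stated in full; the proofs are below) =====
def Claim_equal_replace_even_indices : Prop := ∀ (input_string : String) (replacement_char : String), Dom_replace_even_indices input_string replacement_char → Spec_replace_even_indices input_string replacement_char (replace_even_indices input_string replacement_char)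

-- ===== LEMMAS AND PROOFS =====

-- common value both ports compute: the chars of the result, flag = "current index even?"
def pvInterleave (r : List Char) : List Char → Bool → List Char
  | [], _ => []
  | c :: cs, b => (if b then r else [c]) ++ pvInterleave r cs (!b)

theorem pv_mod_eq_emod (s : Int) : PySem.Int.mod s 2 = s % 2 := by
  simp [PySem.Int.mod, Int.fmod_eq_emod]

theorem pv_mod_parity (s : Int) (_hs : 0 ≤ s) :
    (PySem.Int.mod (s + 1) 2 == 0) = !(PySem.Int.mod s 2 == 0) := by
  rw [pv_mod_eq_emod, pv_mod_eq_emod]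
  by_cases h : s % 2 = 0
  · have h1 : (s + 1) % 2 = 1 := by omega
    simp [h, h1]
  · have h0 : s % 2 = 1 := by omega
    have h1 : (s + 1) % 2 = 0 := by omega
    simp [h0, h1]

theorem pvA_fold (r : List Char) (cs : List Char) : ∀ (s : Int) (acc : List Char), 0 ≤ s →
    (PySem.List.enumerate cs s).foldl
      (fun acc p => if PySem.Int.mod p.1 2 == 0 then acc ++ r else acc ++ [p.2]) acc
    = acc ++ pvInterleave r cs (PySem.Int.mod s 2 == 0) := by
  induction cs with
  | nil => intro s acc _; simp [PySem.List.enumerate_nil, pvInterleave]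
  | cons c cs ih =>
    intro s acc hs
    rw [PySem.List.enumerate_cons, List.foldl_cons, ih (s + 1) _ (by omega),
        pv_mod_parity s hs, pvInterleave]
    split <;> simp

theorem pv_chars_join_nil : ∀ (ls : List (List Char)), PySem.Chars.join [] ls = ls.flatten
  | [] => by simp [PySem.Chars.join, List.intercalate]
  | [x] => by simp [PySem.Chars.join, List.intercalate]
  | x :: y :: t => by
    have ih := pv_chars_join_nil (y :: t)
    simp only [PySem.Chars.join, List.intercalate, List.intersperse,
      List.flatten_cons] at ih ⊢
    simp [ih]

theorem pv_join_empty (parts : List String) :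
    (PySem.Str.join "" parts).toList = (parts.map String.toList).flatten := by
  simp [PySem.Str.join, pv_chars_join_nil]

theorem pvB_main (r : String) : ∀ (cs : List Char),
    ((pvSliceAssignEven (List.replicate ((cs.length + 1) / 2) r)
        (cs.map (fun c => String.ofList [c]))).map String.toList).flatten
      = pvInterleave r.toList cs true
  | [] => by simp [pvSliceAssignEven, pvInterleave]
  | [c] => by simp [pvSliceAssignEven, pvInterleave]
  | c :: d :: ds => by
    have ih := pvB_main r ds
    have hlen : (ds.length + 2 + 1) / 2 = (ds.length + 1) / 2 + 1 := by omega
    simp only [List.map_cons, List.length_cons, hlen, List.replicate_succ,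
      pvSliceAssignEven, List.flatten_cons, pvInterleave, ih]
    simp

theorem replace_even_indices_toList (s r : String) :
    (replace_even_indices s r).toList = pvInterleave r.toList s.toList true := by
  have h := pvA_fold r.toList s.toList 0 [] le_rfl
  rw [PySem.List.enumerate_eq_map_pyRange (d := ' '), List.foldl_map] at h
  simp only [List.nil_append] at h
  unfold replace_even_indices
  simp only [PySem.Str.len_eq, PySem.List.len_eq] at h ⊢
  rw [h]
  norm_num [PySem.Int.mod]

theorem replace_even_indices_alt_toList (s r : String) :
    (replace_even_indices_alt s r).toList = pvInterleave r.toList s.toList true := by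
  unfold replace_even_indices_alt
  rw [pv_join_empty, pvB_main]

-- ===== VERDICT (by name: the statement is the Claim_ definition above) =====
theorem replace_even_indices_spec : Claim_equal_replace_even_indices := by
  intro s r _
  unfold Spec_replace_even_indices
  have h := (replace_even_indices_toList s r).trans
    (replace_even_indices_alt_toList s r).symm
  calc replace_even_indices s r
      = String.ofList (replace_even_indices s r).toList := by simp
    _ = String.ofList (replace_even_indices_alt s r).toList := by rw [h]
    _ = replace_even_indices_alt s r := by simp
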